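-- pv_equiv track=rewrite | github.com/SaRodriguez285/dev_2026_1_workshop1 | src/string/strings.py | es_numero_entero
-- ===== SOURCE A (Python) =====
-- def es_numero_entero(texto):
--     if texto == "":
--         return False
--
--     if texto[0] == "-":
--         texto = texto[1:]
--
--     if texto == "":
--         return False
--
--     for char in texto:
--         if char < '0' or char > '9':
--             return False
--
--     return True
-- ===== SOURCE B (Python) =====
-- import re
--
-- _INT_RE = re.compile(r'-?[0-9]+')
--
-- def es_numero_entero(texto):
--     return bool(_INT_RE.fullmatch(texto))
-- ===== Notes on version B (the rewrite author's own statement) =====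
-- stated objective: idiomatic
-- what changed: Replaces the empty/sign guards and explicit character loop with a single anchored regular-expression match re.fullmatch(r'-?[0-9]+', texto).
import Mathlib
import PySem

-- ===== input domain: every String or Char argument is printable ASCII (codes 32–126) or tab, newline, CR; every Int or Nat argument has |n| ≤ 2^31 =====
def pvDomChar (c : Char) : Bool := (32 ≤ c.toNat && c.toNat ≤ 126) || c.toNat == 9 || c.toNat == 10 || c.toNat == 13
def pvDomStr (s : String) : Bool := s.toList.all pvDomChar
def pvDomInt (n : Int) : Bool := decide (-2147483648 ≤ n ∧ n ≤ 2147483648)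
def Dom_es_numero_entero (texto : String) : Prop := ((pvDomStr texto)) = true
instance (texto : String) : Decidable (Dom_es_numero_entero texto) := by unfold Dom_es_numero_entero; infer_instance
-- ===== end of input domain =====

-- B replaces A's guards-and-loop with a single anchored regex fullmatch (-?[0-9]+); idiomatic, same cost.

-- ===== PORT A =====
-- A's for-loop over the (possibly sign-stripped) characters: return False on the first non-digit.
def esNumLoopA : List Char → Bool
  | [] => true
  | c :: rest => if c < '0' ∨ '9' < c then false else esNumLoopA rest

def es_numero_entero (texto : String) : Bool :=
  let cs := texto.toList
  if cs = [] then false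
  else
    let cs := if PySem.List.pyGet? cs 0 = some '-' then PySem.List.slice cs (some 1) none else cs
    if cs = [] then false
    else esNumLoopA cs

-- ===== PORT B =====
-- The character class [0-9] of the pattern.
def esNumDigitB (c : Char) : Bool := decide ('0' ≤ c) && decide (c ≤ '9')

-- fullmatch of the anchored pattern -?[0-9]+ : an optional leading '-', then one or more [0-9].
def es_numero_entero_alt (texto : String) : Bool :=
  match texto.toList with
  | '-' :: d :: ds => (d :: ds).all esNumDigitB
  | cs => !cs.isEmpty && cs.all esNumDigitB

-- ===== PRECONDITION & SPEC =====
def Spec_es_numero_entero (texto : String) (out : Bool) : Prop := out = es_numero_entero_alt texto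
instance (texto : String) (out : Bool) : Decidable (Spec_es_numero_entero texto out) := by unfold Spec_es_numero_entero; infer_instance

-- ===== CLAIM (what is proved, stated in full; the proofs are below) =====
def Claim_equal_es_numero_entero : Prop := ∀ (texto : String), Dom_es_numero_entero texto → Spec_es_numero_entero texto (es_numero_entero texto)

-- ===== LEMMAS AND PROOFS =====
-- xs[0] on a nonempty list is its head (used to read A's texto[0] test).
theorem pyGet_zero_cons (c : Char) (rest : List Char) :
    PySem.List.pyGet? (c :: rest) 0 = some c := by
  simp [PySem.List.pyGet?, PySem.List.pyIdx?]

-- A's rejection loop accepts exactly the all-[0-9] strings.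
theorem esNumLoopA_eq_all (cs : List Char) : esNumLoopA cs = cs.all esNumDigitB := by
  induction cs with
  | nil => rfl
  | cons c rest ih =>
    simp only [esNumLoopA, List.all_cons, esNumDigitB]
    by_cases h : c < '0' ∨ '9' < c
    · rcases h with h | h <;> simp [h, not_le.mpr h]
    · push Not at h
      simp [h.1, h.2, ih]

-- ===== VERDICT (by name: the statement is the Claim_ definition above) =====
theorem es_numero_entero_spec : Claim_equal_es_numero_entero := by
  intro texto _
  unfold Spec_es_numero_entero es_numero_entero es_numero_entero_alt
  cases hcs : texto.toList with
  | nil => simp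
  | cons c rest =>
    simp only [List.cons_ne_nil, if_false, pyGet_zero_cons]
    by_cases hc : c = '-'
    · subst hc
      cases rest with
      | nil => simp [PySem.List.slice_from_one]; decide
      | cons d ds => simp [PySem.List.slice_from_one, esNumLoopA_eq_all]
    · simp [hc, esNumLoopA_eq_all]
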